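-- pv_equiv track=rewrite | github.com/klai22/motif-mark | motif-mark-oop.py | find_exons_introns_in_seq
-- ===== SOURCE A (Python) =====
-- def find_exons_introns_in_seq(seq):
--     "Identifies which regions are exons (uppercase) vs. introns (lowercase) in given seq. Returns a list of tuples w/ (exon/intron, start pos., end pos.) "
--     # init variables
--     regions = [] # list to hold output (described in doctstring)
--     start = 0 #holds start pos.
--     exon_intron = None # holds strings to differentiate exon vs. intron label assignment
--
--     for i,base in enumerate(seq): # for every base in sequence
--         #EXON
--         if base.isupper(): #if base is uppercase.....
--             # if current region isn't already identified as an exon (exon_intron variable doesn't already have the label 'exon')....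
--             if exon_intron != 'exon':
--                 # 'Close' previous region if any (add the previously stored (intron) information to regions [] now that we ecountered the start of an exon)
--                 if exon_intron:
--                     regions.append((exon_intron,start,i))
--                 #set exon_intron = 'exon' string now
--                 exon_intron = 'exon'
--                 #reset start coordinate
--                 start = i
--         #INTRON
--         elif base.islower(): # if base is lowercase.....
--             ## if current region isn't already identified as intron....
--             if exon_intron != 'intron':
--             # 'Close' previous region (exon) if any --> regions []
--                 if exon_intron:
--                     regions.append((exon_intron,start,i))
--                 #set exon_intron = 'intron' string now
--                 exon_intron = 'intron'
--                 #reset start coordinate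
--                 start = i
--     # Encounter / Add final region to regions []
--     if exon_intron:
--         regions.append((exon_intron,start,len(seq)))
--
--     return regions
-- ===== SOURCE B (Python) =====
-- def find_exons_introns_in_seq(seq):
--     "Identifies which regions are exons (uppercase) vs. introns (lowercase) in given seq. Returns a list of tuples w/ (exon/intron, start pos., end pos.)"
--     # Pass 1: positions of cased letters, tagged with their case.
--     letters = [(i, ch.isupper()) for i, ch in enumerate(seq) if ch.isupper() or ch.islower()]
--     # Pass 2: region start points = letters whose case differs from the previous letter.
--     starts = []
--     prev = None
--     for i, up in letters:
--         if up != prev: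
--             starts.append((i, up))
--         prev = up
--     # Pass 3: each region ends where the next one starts (or at len(seq)).
--     ends = [i for i, _ in starts[1:]] + [len(seq)]
--     return [('exon' if up else 'intron', i, e) for (i, up), e in zip(starts, ends)]
-- ===== Notes on version B (the rewrite author's own statement) =====
-- stated objective: alternative
-- what changed: Replaces A's single-pass state machine (open-region label/start carried across the loop, regions closed on case switches) by a three-stage pipeline: extract cased-letter positions, keep those whose case differs from the previous letter as region starts, then zip each start with the next start (or len(seq)) to build the regions.
import Mathlib
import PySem

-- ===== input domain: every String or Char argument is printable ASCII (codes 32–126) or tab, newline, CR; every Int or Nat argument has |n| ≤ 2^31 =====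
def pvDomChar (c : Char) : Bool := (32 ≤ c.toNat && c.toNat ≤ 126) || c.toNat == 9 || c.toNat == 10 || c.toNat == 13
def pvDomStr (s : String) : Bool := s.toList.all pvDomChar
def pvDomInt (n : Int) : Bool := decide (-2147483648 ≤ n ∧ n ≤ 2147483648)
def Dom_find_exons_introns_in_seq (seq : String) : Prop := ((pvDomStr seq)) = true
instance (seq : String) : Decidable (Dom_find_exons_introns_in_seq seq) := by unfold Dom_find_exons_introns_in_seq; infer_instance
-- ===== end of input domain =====

-- B replaces A's one-pass state machine by three simple passes (letters → region starts → pair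
-- each start with the next); objective: simpler/alternative, same O(n) cost.

-- ===== PORT A =====
-- one step of A's for-loop; state = (regions, start, exon_intron)
def pvStepA (st : List (String × Int × Int) × Int × Option String) (p : Int × Char) :
    List (String × Int × Int) × Int × Option String :=
  let (regions, start, ei) := st
  if PySem.Chars.isupper p.2 then
    if ei ≠ some "exon" then
      ((match ei with | some l => regions ++ [(l, start, p.1)] | none => regions), p.1, some "exon")
    else st
  else if PySem.Chars.islower p.2 then
    if ei ≠ some "intron" then
      ((match ei with | some l => regions ++ [(l, start, p.1)] | none => regions), p.1, some "intron")
    else st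
  else st

def find_exons_introns_in_seq (seq : String) : List (String × Int × Int) :=
  let st := (PySem.List.enumerate seq.toList 0).foldl pvStepA ([], 0, none)
  match st with
  | (regions, start, some l) => regions ++ [(l, start, (PySem.Str.len seq : Int))]
  | (regions, _, none) => regions

-- ===== PORT B =====
-- one step of B's 'starts' loop; state = (starts, prev)
def pvStepB (st : List (Int × Bool) × Option Bool) (p : Int × Bool) :
    List (Int × Bool) × Option Bool :=
  (if some p.2 ≠ st.2 then st.1 ++ [p] else st.1, some p.2)

def find_exons_introns_in_seq_alt (seq : String) : List (String × Int × Int) :=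
  let letters := (PySem.List.enumerate seq.toList 0).filterMap
    (fun p => if PySem.Chars.isupper p.2 || PySem.Chars.islower p.2
              then some (p.1, PySem.Chars.isupper p.2) else none)
  let starts := (letters.foldl pvStepB ([], none)).1
  let ends := (PySem.List.slice starts (some 1) none).map (·.1) ++ [(PySem.Str.len seq : Int)]
  (starts.zip ends).map (fun q => ((if q.1.2 then "exon" else "intron"), q.1.1, q.2))

-- ===== PRECONDITION & SPEC =====
def Spec_find_exons_introns_in_seq (seq : String) (out : List (String × Int × Int)) : Prop := out = find_exons_introns_in_seq_alt seq
instance (seq : String) (out : List (String × Int × Int)) : Decidable (Spec_find_exons_introns_in_seq seq out) := by unfold Spec_find_exons_introns_in_seq; infer_instance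

-- ===== CLAIM (what is proved, stated in full; the proofs are below) =====
def Claim_equal_find_exons_introns_in_seq : Prop := ∀ (seq : String), Dom_find_exons_introns_in_seq seq → Spec_find_exons_introns_in_seq seq (find_exons_introns_in_seq seq)

-- ===== LEMMAS AND PROOFS =====

-- recursive form of B's 'starts' loop
def pvStarts (prev : Option Bool) : List (Int × Bool) → List (Int × Bool)
  | [] => []
  | p :: t => (if some p.2 ≠ prev then [p] else []) ++ pvStarts (some p.2) t

-- recursive form of B's zip-with-next-start pairing
def pvPair (n : Int) : List (Int × Bool) → List (String × Int × Int)
  | [] => []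
  | p :: t => ((if p.2 then "exon" else "intron"), p.1,
               (match t with | [] => n | q :: _ => q.1)) :: pvPair n t

def pvLetters (s : Int) (l : List Char) : List (Int × Bool) :=
  (PySem.List.enumerate l s).filterMap
    (fun p => if PySem.Chars.isupper p.2 || PySem.Chars.islower p.2
              then some (p.1, PySem.Chars.isupper p.2) else none)

def pvFinish (n : Int) (st : List (String × Int × Int) × Int × Option String) :
    List (String × Int × Int) :=
  match st with
  | (regions, start, some l) => regions ++ [(l, start, n)]
  | (regions, _, none) => regions

lemma pvStarts_foldl (xs : List (Int × Bool)) : ∀ (acc : List (Int × Bool)) (prev : Option Bool),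
    xs.foldl pvStepB (acc, prev) = (acc ++ pvStarts prev xs, (xs.map (fun p => some p.2)).getLastD prev) := by
  induction xs with
  | nil => intro acc prev; simp [pvStarts]
  | cons p t ih =>
    intro acc prev
    simp only [List.foldl_cons, pvStepB, pvStarts, List.map_cons, List.getLastD_cons]
    by_cases h : some p.2 = prev <;> simp [h, ih]

lemma pvPair_zip (n : Int) : ∀ (xs : List (Int × Bool)),
    (xs.zip ((PySem.List.slice xs (some 1) none).map (·.1) ++ [n])).map
      (fun q => ((if q.1.2 then "exon" else "intron"), q.1.1, q.2)) = pvPair n xs := by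
  intro xs
  induction xs with
  | nil => simp [pvPair]
  | cons p t ih =>
    rw [PySem.List.slice_from_one] at *
    cases t with
    | nil => simp [pvPair]
    | cons q t' =>
      simp only [List.tail_cons, List.map_cons, pvPair] at *
      simp [ih]

-- the open region of A's state, as the list element B will pair up
def pvPre (start : Int) : Option String → List (Int × Bool)
  | none => []
  | some l => [(start, l = "exon")]

def pvPrev : Option String → Option Bool
  | none => none
  | some l => some (l = "exon")

-- main invariant: A's remaining fold, finished at n, produces exactly B's paired-up starts
lemma pvMain (n : Int) (l : List Char) : ∀ (s : Int) (regions : List (String × Int × Int))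
    (start : Int) (ei : Option String), (ei = none ∨ ei = some "exon" ∨ ei = some "intron") →
    pvFinish n ((PySem.List.enumerate l s).foldl pvStepA (regions, start, ei)) =
      regions ++ pvPair n (pvPre start ei ++ pvStarts (pvPrev ei) (pvLetters s l)) := by
  induction l with
  | nil =>
    intro s regions start ei hei
    rcases hei with h | h | h <;> subst h <;>
      simp [pvFinish, pvLetters, PySem.List.enumerate_nil, pvPre, pvPrev, pvStarts, pvPair]
  | cons c t ih =>
    intro s regions start ei hei
    rw [pvLetters, PySem.List.enumerate_cons]
    simp only [List.foldl_cons, List.filterMap_cons]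
    rw [show ((PySem.List.enumerate t (s+1)).filterMap
      (fun p => if PySem.Chars.isupper p.2 || PySem.Chars.islower p.2
                then some (p.1, PySem.Chars.isupper p.2) else none)) = pvLetters (s+1) t from rfl]
    by_cases hu : PySem.Chars.isupper c = true
    · have hl : PySem.Chars.islower c = false := by
        simp only [PySem.Chars.isupper, Bool.and_eq_true, decide_eq_true_eq] at hu
        simp only [PySem.Chars.islower, Bool.and_eq_false_iff, decide_eq_false_iff_not]
        exact Or.inl (fun h => absurd (le_trans h hu.2) (by decide))
      rcases hei with h | h | h <;> subst h
      · simp only [pvStepA, hu, hl]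
        try norm_num
        try rw [if_neg (by decide)]
        rw [ih (s+1) regions s (some "exon") (by simp)]
        simp [pvPre, pvPrev, pvStarts]
      · simp only [pvStepA, hu, hl]
        try norm_num
        rw [ih (s+1) regions start (some "exon") (by simp)]
        simp [pvPre, pvPrev, pvStarts]
      · simp only [pvStepA, hu, hl]
        try norm_num
        try rw [if_neg (by decide)]
        rw [ih (s+1) (regions ++ [("intron", start, s)]) s (some "exon") (by simp)]
        simp [pvPre, pvPrev, pvStarts, pvPair]
    · have hu' : PySem.Chars.isupper c = false := by simpa using hu
      by_cases hlo : PySem.Chars.islower c = true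
      · rcases hei with h | h | h <;> subst h
        · simp only [pvStepA, hu', hlo]
          try norm_num
          try rw [if_neg (by decide)]
          rw [ih (s+1) regions s (some "intron") (by simp)]
          simp [pvPre, pvPrev, pvStarts]
        · simp only [pvStepA, hu', hlo]
          try norm_num
          try rw [if_neg (by decide)]
          rw [ih (s+1) (regions ++ [("exon", start, s)]) s (some "intron") (by simp)]
          simp [pvPre, pvPrev, pvStarts, pvPair]
        · simp only [pvStepA, hu', hlo]
          try norm_num
          rw [ih (s+1) regions start (some "intron") (by simp)]
          simp [pvPre, pvPrev, pvStarts]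
      · have hlo' : PySem.Chars.islower c = false := by simpa using hlo
        simp only [pvStepA, hu', hlo', Bool.or_self, Bool.false_eq_true, ite_false]
        exact ih (s+1) regions start ei hei

-- ===== VERDICT (by name: the statement is the Claim_ definition above) =====
theorem find_exons_introns_in_seq_spec : Claim_equal_find_exons_introns_in_seq := by
  intro seq _
  show find_exons_introns_in_seq seq = find_exons_introns_in_seq_alt seq
  have h1 : find_exons_introns_in_seq_alt seq =
      ((((pvLetters 0 seq.toList).foldl pvStepB ([], none)).1).zip
        ((PySem.List.slice (((pvLetters 0 seq.toList).foldl pvStepB ([], none)).1) (some 1) none).map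
            (·.1) ++ [(PySem.Str.len seq : Int)])).map
        (fun q => ((if q.1.2 then "exon" else "intron"), q.1.1, q.2)) := rfl
  have h2 : find_exons_introns_in_seq seq =
      pvFinish ((PySem.Str.len seq : Int))
        ((PySem.List.enumerate seq.toList 0).foldl pvStepA ([], 0, none)) := rfl
  rw [h1, pvPair_zip, pvStarts_foldl, h2, pvMain _ _ 0 [] 0 none (Or.inl rfl)]
  simp [pvPre, pvPrev]
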